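-- pv_equiv track=rewrite | github.com/YoujingYu99/visualising_data_bias | bias_visualisation_app/utils/functions.py | dict_by_gender
-- ===== SOURCE A (Python) =====
-- def dict_by_gender(token_list, value_list):
--     # convert lists to dictionary
--     data = dict(zip(token_list, value_list))
--     data = {k: v or 0 for (k, v) in data.items()}
--
--     # separate into male and female dictionaries
--     # sort from largest to smallest in each case
--     male_dict = {k: v for (k, v) in data.items() if v > 0}
--     male_dict = sorted(male_dict.items(), key=lambda x: x[1], reverse=True)
--     female_dict = {k: v for (k, v) in data.items() if v < 0}
--     female_dict = sorted(female_dict.items(), key=lambda x: x[1], reverse=True)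
--
--     return male_dict, female_dict
-- ===== SOURCE B (Python) =====
-- def _insert_desc(lst, pair):
--     # splice pair in after all entries whose value is >= its own (stable descending order)
--     i = 0
--     while i < len(lst) and lst[i][1] >= pair[1]:
--         i += 1
--     lst.insert(i, pair)
--
--
-- def dict_by_gender(token_list, value_list):
--     # explicit last-wins dedup: first-occurrence order + latest value per token
--     order = []
--     last = {}
--     for k, v in zip(token_list, value_list):
--         if k not in last:
--             order.append(k)
--         last[k] = v
--     # one routing pass: place each entry by sign, keeping each list sorted as we go
--     male, female = [], []
--     for k in order:
--         v = last[k] or 0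
--         if v > 0:
--             _insert_desc(male, (k, v))
--         elif v < 0:
--             _insert_desc(female, (k, v))
--     return male, female
-- ===== Notes on version B (the rewrite author's own statement) =====
-- stated objective: alternative
-- what changed: B drops the dict comprehensions and both library sorts: it dedups with an explicit first-occurrence order list plus a last-value map, then makes one routing pass that places each entry by sign directly into its output list, kept descending by in-place insertion (an online insertion sort instead of filter-then-sort).
import Mathlib
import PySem

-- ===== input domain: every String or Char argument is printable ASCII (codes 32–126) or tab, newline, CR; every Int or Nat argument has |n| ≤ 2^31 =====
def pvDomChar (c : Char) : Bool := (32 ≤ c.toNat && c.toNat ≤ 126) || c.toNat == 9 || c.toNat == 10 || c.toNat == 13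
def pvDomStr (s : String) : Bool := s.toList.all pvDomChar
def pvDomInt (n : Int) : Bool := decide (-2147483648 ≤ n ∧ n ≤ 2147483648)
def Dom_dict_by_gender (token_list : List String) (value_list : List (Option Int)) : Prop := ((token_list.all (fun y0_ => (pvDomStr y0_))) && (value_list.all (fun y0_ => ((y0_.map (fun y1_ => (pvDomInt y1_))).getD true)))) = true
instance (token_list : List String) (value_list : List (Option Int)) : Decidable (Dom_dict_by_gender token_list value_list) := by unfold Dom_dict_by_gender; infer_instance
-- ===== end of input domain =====

-- B replaces A's dict comprehensions and two library sorts by an explicit dedup pass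
-- (first-occurrence order list + last-value map) and one routing pass that keeps each
-- output list descending by in-place insertion (objective: alternative algorithm).


-- ===== PORT A =====
-- Python's `v or 0` on an Option Int: falsy (None, 0) becomes 0, otherwise the value itself.
def pvOrZero (v : Option Int) : Int :=
  match v with
  | none => 0
  | some x => if x = 0 then 0 else x

def dict_by_gender (token_list : List String) (value_list : List (Option Int)) : (List (String × Int)) × (List (String × Int)) :=
  let data := PySem.Dict.ofList (token_list.zip value_list)
  let data2 := PySem.Dict.ofList (data.items.map (fun p => (p.1, pvOrZero p.2)))
  let male_dict := PySem.Dict.ofList (data2.items.filter (fun p => decide (p.2 > 0)))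
  let male_sorted := PySem.List.sorted male_dict.items (fun p => p.2) true
  let female_dict := PySem.Dict.ofList (data2.items.filter (fun p => decide (p.2 < 0)))
  let female_sorted := PySem.List.sorted female_dict.items (fun p => p.2) true
  (male_sorted, female_sorted)

-- ===== PORT B =====
-- _insert_desc: scan past entries with value >= pair's, splice pair in there.
def pvInsertDesc (lst : List (String × Int)) (pair : String × Int) : List (String × Int) :=
  match lst with
  | [] => [pair]
  | y :: t => if y.2 < pair.2 then pair :: y :: t else y :: pvInsertDesc t pair

def dict_by_gender_alt (token_list : List String) (value_list : List (Option Int)) : (List (String × Int)) × (List (String × Int)) :=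
  -- first loop: explicit last-wins dedup (order = first-occurrence order, last = latest value)
  let ol := (token_list.zip value_list).foldl
    (fun (acc : List String × PySem.Dict String (Option Int)) kv =>
      ((if acc.2.contains kv.1 then acc.1 else acc.1 ++ [kv.1]), acc.2.insert kv.1 kv.2))
    ([], PySem.Dict.empty)
  let order := ol.1
  let last := ol.2
  -- second loop: route each entry by sign, keeping each list descending
  order.foldl
    (fun (acc : List (String × Int) × List (String × Int)) k =>
      -- k is always a key of last, so Python's last[k] never raises; ported as get?.getD
      let v := pvOrZero ((last.get? k).getD none)
      if 0 < v then (pvInsertDesc acc.1 (k, v), acc.2)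
      else if v < 0 then (acc.1, pvInsertDesc acc.2 (k, v))
      else acc)
    ([], [])

-- ===== PRECONDITION & SPEC =====
def Spec_dict_by_gender (token_list : List String) (value_list : List (Option Int)) (out : (List (String × Int)) × (List (String × Int))) : Prop := out = dict_by_gender_alt token_list value_list
instance (token_list : List String) (value_list : List (Option Int)) (out : (List (String × Int)) × (List (String × Int))) : Decidable (Spec_dict_by_gender token_list value_list out) := by unfold Spec_dict_by_gender; infer_instance

-- ===== CLAIM (what is proved, stated in full; the proofs are below) =====
def Claim_equal_dict_by_gender : Prop := ∀ (token_list : List String) (value_list : List (Option Int)), Dom_dict_by_gender token_list value_list → Spec_dict_by_gender token_list value_list (dict_by_gender token_list value_list)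

-- ===== LEMMAS AND PROOFS =====

-- a dict built from pairs with distinct keys keeps exactly those pairs, in order
theorem pv_items_ofList_nodup {ν : Type} (l : List (String × ν))
    (h : (l.map Prod.fst).Nodup) : (PySem.Dict.ofList l).items = l := by
  induction l using List.reverseRecOn with
  | nil => rfl
  | append_singleton l p ih =>
    have h2 : (l.map Prod.fst ++ [p.1]).Nodup := by simpa using h
    have h' : (l.map Prod.fst).Nodup := h2.of_append_left
    have hnm : p.1 ∉ l.map Prod.fst := by
      have h3 := List.nodup_append.mp h2
      intro hm
      exact h3.2.2 p.1 hm p.1 (by simp) rfl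
    have hfold : PySem.Dict.ofList (l ++ [p]) = (PySem.Dict.ofList l).insert p.1 p.2 := by
      simp [PySem.Dict.ofList, PySem.Dict.update, List.foldl_append]
    have hcont : (PySem.Dict.ofList l).contains p.1 = false := by
      by_contra hc
      have hc' : (PySem.Dict.ofList l).contains p.1 = true := by
        cases hx : (PySem.Dict.ofList l).contains p.1 <;> simp_all
      have hk : p.1 ∈ (PySem.Dict.ofList l).keys :=
        (PySem.Dict.contains_iff_mem_keys _ _).mp hc'
      have hkeq : (PySem.Dict.ofList l).keys = l.map Prod.fst := by
        simp [PySem.Dict.keys, ih h']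
      exact hnm (hkeq ▸ hk)
    rw [hfold, PySem.Dict.items_insert_of_not_contains _ _ hcont, ih h']

-- B's insertion step IS insertBy with Python's stable-descending predicate
theorem pv_insertDesc_eq_insertBy (l : List (String × Int)) (p : String × Int) :
    pvInsertDesc l p = PySem.List.insertBy (fun a b => decide (b.2 < a.2)) p l := by
  induction l with
  | nil => rfl
  | cons y t ih => simp [pvInsertDesc, PySem.List.insertBy, ih]

-- B's first loop computes exactly (keys, dict) of the foldl-insert dict
theorem pv_loop1 (l : List (String × Option Int)) (d : PySem.Dict String (Option Int)) :
    l.foldl (fun (acc : List String × PySem.Dict String (Option Int)) kv =>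
        ((if acc.2.contains kv.1 then acc.1 else acc.1 ++ [kv.1]), acc.2.insert kv.1 kv.2))
      (d.keys, d)
    = ((l.foldl (fun d kv => d.insert kv.1 kv.2) d).keys,
       l.foldl (fun d kv => d.insert kv.1 kv.2) d) := by
  induction l generalizing d with
  | nil => rfl
  | cons kv t ih =>
    simp only [List.foldl_cons]
    have hk : (if d.contains kv.1 then d.keys else d.keys ++ [kv.1])
        = (d.insert kv.1 kv.2).keys := by
      by_cases hc : d.contains kv.1
      · rw [if_pos hc, PySem.Dict.keys_insert_of_contains d kv.2 hc]
      · rw [if_neg hc, PySem.Dict.keys_insert_of_not_contains d kv.2 (by simpa using hc)]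
    rw [hk]
    exact ih (d.insert kv.1 kv.2)

-- B's routing loop = the two sign-filtered insertion folds
theorem pv_loop2 (l : List (String × Int)) (a b : List (String × Int)) :
    l.foldl (fun (acc : List (String × Int) × List (String × Int)) p =>
        if 0 < p.2 then (pvInsertDesc acc.1 p, acc.2)
        else if p.2 < 0 then (acc.1, pvInsertDesc acc.2 p)
        else acc) (a, b)
    = ((l.filter (fun p => decide (p.2 > 0))).foldl pvInsertDesc a,
       (l.filter (fun p => decide (p.2 < 0))).foldl pvInsertDesc b) := by
  induction l generalizing a b with
  | nil => rfl
  | cons p t ih =>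
    simp only [List.foldl_cons, List.filter_cons, gt_iff_lt]
    rcases lt_trichotomy (0 : Int) p.2 with h | h | h
    · rw [if_pos h, decide_eq_true h, decide_eq_false (by omega : ¬ p.2 < 0)]
      exact ih _ _
    · rw [if_neg (by omega), if_neg (by omega), decide_eq_false (by omega : ¬ (0:Int) < p.2),
        decide_eq_false (by omega : ¬ p.2 < 0)]
      exact ih _ _
    · rw [if_neg (by omega), if_pos h, decide_eq_false (by omega : ¬ (0:Int) < p.2),
        decide_eq_true h]
      exact ih _ _

-- an insertion fold from [] is Python's stable reverse sort
theorem pv_foldl_insertDesc_eq_sorted (l : List (String × Int)) :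
    l.foldl pvInsertDesc [] = PySem.List.sorted l (fun p => p.2) true := by
  rw [PySem.List.sorted_rev_eq_foldl_insertBy]
  exact List.foldl_ext _ _ _ (fun acc p _ => pv_insertDesc_eq_insertBy acc p)

theorem dict_by_gender_eq (token_list : List String) (value_list : List (Option Int)) :
    dict_by_gender token_list value_list = dict_by_gender_alt token_list value_list := by
  unfold dict_by_gender dict_by_gender_alt
  set D := PySem.Dict.ofList (token_list.zip value_list) with hD
  -- B's first loop yields (D.keys, D)
  have hfold : (token_list.zip value_list).foldl
      (fun (acc : List String × PySem.Dict String (Option Int)) kv =>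
        ((if acc.2.contains kv.1 then acc.1 else acc.1 ++ [kv.1]), acc.2.insert kv.1 kv.2))
      ([], PySem.Dict.empty) = (D.keys, D) := by
    have h0 : (([], PySem.Dict.empty) : List String × PySem.Dict String (Option Int))
        = ((PySem.Dict.empty : PySem.Dict String (Option Int)).keys, PySem.Dict.empty) := by
      simp [PySem.Dict.keys_empty]
    rw [h0, pv_loop1]
    rfl
  simp only [hfold]
  have hnd : D.keys.Nodup := PySem.Dict.nodup_keys_ofList _
  -- items of the normalised dict are the mapped items of D
  have hmapnd : ((D.items.map (fun p => (p.1, pvOrZero p.2))).map Prod.fst).Nodup := by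
    simpa [List.map_map, Function.comp, PySem.Dict.keys] using hnd
  have hdata2 : (PySem.Dict.ofList (D.items.map (fun p => (p.1, pvOrZero p.2)))).items
      = D.items.map (fun p => (p.1, pvOrZero p.2)) := pv_items_ofList_nodup _ hmapnd
  have hfnd : ∀ (P : String × Int → Bool),
      (((D.items.map (fun p => (p.1, pvOrZero p.2))).filter P).map Prod.fst).Nodup :=
    fun P => hmapnd.sublist (List.Sublist.map Prod.fst List.filter_sublist)
  have hm := pv_items_ofList_nodup _ (hfnd (fun p => decide (p.2 > 0)))
  have hf := pv_items_ofList_nodup _ (hfnd (fun p => decide (p.2 < 0)))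
  simp only [hdata2, hm, hf]
  -- B's second loop: rewrite the fold over keys as a fold over the mapped items
  have hitems : D.items = D.keys.map (fun k => (k, D.getD k none)) :=
    PySem.Dict.items_eq_map_keys D hnd none
  have hkeyfold :
      D.keys.foldl (fun (acc : List (String × Int) × List (String × Int)) k =>
          let v := pvOrZero ((D.get? k).getD none)
          if 0 < v then (pvInsertDesc acc.1 (k, v), acc.2)
          else if v < 0 then (acc.1, pvInsertDesc acc.2 (k, v))
          else acc) ([], [])
      = (D.items.map (fun p => (p.1, pvOrZero p.2))).foldl
          (fun (acc : List (String × Int) × List (String × Int)) p =>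
            if 0 < p.2 then (pvInsertDesc acc.1 p, acc.2)
            else if p.2 < 0 then (acc.1, pvInsertDesc acc.2 p)
            else acc) ([], []) := by
    rw [hitems, List.map_map, List.foldl_map]
    exact List.foldl_ext _ _ _ (fun acc k _ => by simp [PySem.Dict.getD_eq_get?_getD])
  simp only [hkeyfold, pv_loop2, pv_foldl_insertDesc_eq_sorted]

-- ===== VERDICT (by name: the statement is the Claim_ definition above) =====
theorem dict_by_gender_spec : Claim_equal_dict_by_gender := by
  intro token_list value_list _
  unfold Spec_dict_by_gender
  exact dict_by_gender_eq token_list value_list
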